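-- pv_equiv track=rewrite | github.com/vonwolfgang/PolitecnicoPastExams | freedonia/main.py | createUpdatedRulesDict
-- ===== SOURCE A (Python) =====
-- def createUpdatedRulesDict(datesList, rulesDict):
--
--
--     #datesList = readDatesCreateList()
--     #rulesDict = readRulesCreateDict()
--
--     updatedRulesDict = {}
--
--     for dateRequested in sorted(datesList):
--
--         for rulesDate in sorted(rulesDict):
--
--             if(dateRequested not in updatedRulesDict):
--
--                 updatedRulesDict[dateRequested] = []
--
--                 if(rulesDate < dateRequested):
--                     for element in rulesDict[rulesDate]:
--
--                         if(element[0] == "+"):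
--                             updatedRulesDict[dateRequested].append(element)
--
--                 elif(rulesDate > dateRequested):
--
--                     for element in rulesDict[rulesDate]:
--                         if(element[0] == "-" and element in updatedRulesDict[dateRequested]):
--                             updatedRulesDict[dateRequested].remove(element)
--
--             else:
--                 if(rulesDate < dateRequested):
--                     for element in rulesDict[rulesDate]:
--                         if(element[0] == "+"):
--                             updatedRulesDict[dateRequested].append(element)
--
--                 elif(rulesDate > dateRequested):
--                     for element in rulesDict[rulesDate]:
--                         if(element[0] == "-" and element in updatedRulesDict[dateRequested]):
--                             updatedRulesDict[dateRequested].remove(element)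
--
--
--     return updatedRulesDict
-- ===== SOURCE B (Python) =====
-- def createUpdatedRulesDict(datesList, rulesDict):
--     rd = sorted(rulesDict)
--     result = {}
--     acc = []
--     i = 0
--     for d in sorted(set(datesList)):
--         while i < len(rd) and rd[i] < d:
--             for e in rulesDict[rd[i]]:
--                 if e.startswith("+"):
--                     acc.append(e)
--             i += 1
--         result[d] = list(acc)
--     return result
-- ===== Notes on version B (the rewrite author's own statement) =====
-- stated objective: faster
-- what changed: Replaces the nested per-date rescan of all rule dates (with its dead remove branch) by one two-pointer merge over the sorted distinct dates and sorted rule dates with an incrementally accumulated '+'-prefix list.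
-- intended difference: On inputs where rulesDict is empty but dates are requested (A returns an empty dict instead of one empty list per date, because its whole body sits inside the loop over rule dates) or where a requested date occurs twice and some earlier rule date contributes a '+' rule (A appends that date's whole rule list once per duplicate occurrence), B returns one entry per distinct requested date holding the '+' rules of strictly earlier rule dates exactly once, which is the intended per-date accumulation. — e.g. on createUpdatedRulesDict(["b", "b"], [("a", ["+x"])]): A returns [("b", ["+x", "+x"])], B returns [("b", ["+x"])]
import Mathlib
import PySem

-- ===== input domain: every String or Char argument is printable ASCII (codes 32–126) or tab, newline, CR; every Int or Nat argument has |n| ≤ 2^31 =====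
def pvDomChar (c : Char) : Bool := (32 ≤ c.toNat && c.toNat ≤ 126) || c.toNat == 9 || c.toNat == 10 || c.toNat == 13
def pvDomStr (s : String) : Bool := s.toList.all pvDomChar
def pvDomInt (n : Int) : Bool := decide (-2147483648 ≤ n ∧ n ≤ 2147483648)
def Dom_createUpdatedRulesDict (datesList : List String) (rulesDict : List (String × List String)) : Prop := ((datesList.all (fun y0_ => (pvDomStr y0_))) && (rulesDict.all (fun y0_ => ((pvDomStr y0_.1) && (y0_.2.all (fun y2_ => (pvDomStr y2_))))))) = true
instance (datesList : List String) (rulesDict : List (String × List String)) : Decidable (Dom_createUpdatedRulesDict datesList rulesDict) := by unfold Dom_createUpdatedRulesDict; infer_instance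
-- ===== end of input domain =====

-- B replaces A's per-date rescan of all rule dates (dead remove branch included) by a
-- two-pointer merge over the sorted distinct dates with an incrementally accumulated
-- '+'-rule prefix list (objective: faster).


-- ===== PORT A =====
-- the "rulesDate < dateRequested" append loop of A
def aPlusLoop (rules : PySem.Dict String (List String)) (dateRequested : String)
    (upd : PySem.Dict String (List String)) (rulesDate : String) : PySem.Dict String (List String) :=
  (rules.getD rulesDate []).foldl
    (fun u element =>
      if PySem.Str.pyGet? element 0 = some '+' then
        u.modify dateRequested [] (fun l => l ++ [element])
      else u) upd

-- the "rulesDate > dateRequested" remove loop of A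
def aMinusLoop (rules : PySem.Dict String (List String)) (dateRequested : String)
    (upd : PySem.Dict String (List String)) (rulesDate : String) : PySem.Dict String (List String) :=
  (rules.getD rulesDate []).foldl
    (fun u element =>
      if PySem.Str.pyGet? element 0 = some '-' ∧ element ∈ u.getD dateRequested [] then
        u.modify dateRequested [] (fun l => (PySem.List.remove? l element).getD l)
      else u) upd

-- the if/elif ladder (duplicated verbatim in A's two branches)
def aBranch (rules : PySem.Dict String (List String)) (dateRequested : String)
    (upd : PySem.Dict String (List String)) (rulesDate : String) : PySem.Dict String (List String) :=
  if rulesDate < dateRequested then aPlusLoop rules dateRequested upd rulesDate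
  else if dateRequested < rulesDate then aMinusLoop rules dateRequested upd rulesDate
  else upd

-- body of A's inner loop over sorted(rulesDict)
def aInner (rules : PySem.Dict String (List String)) (dateRequested : String)
    (upd : PySem.Dict String (List String)) (rulesDate : String) : PySem.Dict String (List String) :=
  if upd.contains dateRequested = false then
    aBranch rules dateRequested (upd.insert dateRequested []) rulesDate
  else
    aBranch rules dateRequested upd rulesDate

def createUpdatedRulesDict (datesList : List String) (rulesDict : List (String × List String)) : List (String × List String) :=
  ((PySem.List.sorted datesList (fun x => x) false).foldl
      (fun upd dateRequested =>
        (PySem.List.sorted (rulesDict.map (fun kv => kv.1)) (fun x => x) false).foldl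
          (aInner (PySem.Dict.mk rulesDict) dateRequested) upd)
      PySem.Dict.empty).items

-- ===== PORT B =====
-- B's inner 'for e in rulesDict[rd[i]]' append loop
def altPlus (rules : PySem.Dict String (List String)) (k : String) (acc : List String) : List String :=
  (rules.getD k []).foldl (fun a e => if PySem.Str.startswith e "+" then a ++ [e] else a) acc

-- B's 'while i < len(rd) and rd[i] < d' two-pointer loop: (remaining rule dates, new acc)
def altWhile (rules : PySem.Dict String (List String)) (d : String) :
    List String → List String → List String × List String
  | [], acc => ([], acc)
  | k :: rest, acc =>
      if k < d then altWhile rules d rest (altPlus rules k acc)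
      else (k :: rest, acc)

-- B's main loop over the sorted distinct dates
def altMain (rules : PySem.Dict String (List String)) :
    List String → List String → List String → List (String × List String)
  | [], _, _ => []
  | d :: ds, rd, acc =>
      let p := altWhile rules d rd acc
      (d, p.2) :: altMain rules ds p.1 p.2

def createUpdatedRulesDict_alt (datesList : List String) (rulesDict : List (String × List String)) : List (String × List String) :=
  altMain (PySem.Dict.mk rulesDict)
    (PySem.List.sorted (PySem.Set.ofList datesList) (fun x => x) false)
    (PySem.List.sorted (rulesDict.map (fun kv => kv.1)) (fun x => x) false)
    []

-- ===== PRECONDITION & SPEC =====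
-- Nodup keys: the assoc list models a Python dict, whose keys are necessarily distinct
-- (it excludes no input the Python A can receive); the second conjunct excludes exactly
-- the inputs on which A raises IndexError (element[0] on an empty rule string, reached
-- from some requested date under a different rule date).
def Pre_createUpdatedRulesDict (datesList : List String) (rulesDict : List (String × List String)) : Prop :=
  (rulesDict.map (fun kv => kv.1)).Nodup ∧
  ∀ d ∈ datesList, ∀ kv ∈ rulesDict, kv.1 ≠ d → "" ∉ kv.2
instance (datesList : List String) (rulesDict : List (String × List String)) : Decidable (Pre_createUpdatedRulesDict datesList rulesDict) := by unfold Pre_createUpdatedRulesDict; infer_instance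

def pvWitness_createUpdatedRulesDict : List String × (List (String × List String)) := (["b"], [("a", ["+x"])])

-- On inputs where rulesDict is empty but dates are requested (A returns an empty dict, its whole
-- body being inside the loop over rule dates) or where a requested date occurs twice and some
-- strictly earlier rule date has a '+' rule (A appends that date's whole accumulated rule list
-- once per occurrence), B returns one entry per distinct date with each '+' rule once — the
-- intended per-date accumulation.
def D_createUpdatedRulesDict (datesList : List String) (rulesDict : List (String × List String)) : Prop :=
  (rulesDict = [] ∧ datesList ≠ []) ∨
  (∃ d ∈ datesList, 2 ≤ datesList.count d ∧
    ∃ kv ∈ rulesDict, kv.1 < d ∧ ∃ e ∈ kv.2, PySem.Str.startswith e "+" = true)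
instance (datesList : List String) (rulesDict : List (String × List String)) : Decidable (D_createUpdatedRulesDict datesList rulesDict) := by unfold D_createUpdatedRulesDict; infer_instance

def Spec_createUpdatedRulesDict (datesList : List String) (rulesDict : List (String × List String)) (out : List (String × List String)) : Prop := ¬ D_createUpdatedRulesDict datesList rulesDict → out = createUpdatedRulesDict_alt datesList rulesDict
instance (datesList : List String) (rulesDict : List (String × List String)) (out : List (String × List String)) : Decidable (Spec_createUpdatedRulesDict datesList rulesDict out) := by unfold Spec_createUpdatedRulesDict; infer_instance

def pvDiffWitness_createUpdatedRulesDict : List String × (List (String × List String)) := (["b", "b"], [("a", ["+x"])])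
def pvDiffWitnessOut_createUpdatedRulesDict : (List (String × List String)) × (List (String × List String)) :=
  ([("b", ["+x", "+x"])], [("b", ["+x"])])

-- ===== CLAIM (what is proved, stated in full; the proofs are below) =====
def Claim_unchanged_createUpdatedRulesDict : Prop := ∀ (datesList : List String) (rulesDict : List (String × List String)), Dom_createUpdatedRulesDict datesList rulesDict → Pre_createUpdatedRulesDict datesList rulesDict → Spec_createUpdatedRulesDict datesList rulesDict (createUpdatedRulesDict datesList rulesDict)
def Claim_changed_createUpdatedRulesDict : Prop := Dom_createUpdatedRulesDict (pvDiffWitness_createUpdatedRulesDict.1) (pvDiffWitness_createUpdatedRulesDict.2) ∧ Pre_createUpdatedRulesDict (pvDiffWitness_createUpdatedRulesDict.1) (pvDiffWitness_createUpdatedRulesDict.2) ∧ D_createUpdatedRulesDict (pvDiffWitness_createUpdatedRulesDict.1) (pvDiffWitness_createUpdatedRulesDict.2) ∧ createUpdatedRulesDict (pvDiffWitness_createUpdatedRulesDict.1) (pvDiffWitness_createUpdatedRulesDict.2) = pvDiffWitnessOut_createUpdatedRulesDict.1 ∧ createUpdatedRulesDict_alt (pvDiffWitness_createUpdatedRulesDict.1)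 (pvDiffWitness_createUpdatedRulesDict.2) = pvDiffWitnessOut_createUpdatedRulesDict.2 ∧ pvDiffWitnessOut_createUpdatedRulesDict.1 ≠ pvDiffWitnessOut_createUpdatedRulesDict.2
def Claim_exact_createUpdatedRulesDict : Prop := ∀ (datesList : List String) (rulesDict : List (String × List String)), Dom_createUpdatedRulesDict datesList rulesDict → Pre_createUpdatedRulesDict datesList rulesDict → D_createUpdatedRulesDict datesList rulesDict → createUpdatedRulesDict datesList rulesDict ≠ createUpdatedRulesDict_alt datesList rulesDict

-- ===== LEMMAS AND PROOFS =====

-- the common '+'-selection: predicate, per-key '+' rules, accumulated '+' rules of keys < d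
def plusPred (e : String) : Bool := PySem.Str.startswith e "+"
def plusOf (rules : PySem.Dict String (List String)) (k : String) : List String :=
  (rules.getD k []).filter plusPred
def pFor (rules : PySem.Dict String (List String)) (rk : List String) (d : String) : List String :=
  (rk.filter (fun k => decide (k < d))).flatMap (fun k => plusOf rules k)
def flatRep (n : Nat) (l : List String) : List String := (List.replicate n l).flatten

theorem plus_char (e : String) : (PySem.Str.pyGet? e 0 = some '+') ↔ plusPred e = true := by
  simp only [plusPred, PySem.Str.pyGet?, PySem.Str.startswith, PySem.Chars.pyGet?,
    PySem.Chars.startswith]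
  cases h : e.toList with
  | nil => simp [PySem.List.pyGet?, PySem.List.pyIdx?]
  | cons c cs =>
    simp [PySem.List.pyGet?, PySem.List.pyIdx?, List.isPrefixOf]
    exact eq_comm

theorem pFor_plus (rules : PySem.Dict String (List String)) (rk : List String) (d e : String)
    (h : e ∈ pFor rules rk d) : plusPred e = true := by
  simp only [pFor, List.mem_flatMap, plusOf, List.mem_filter] at h
  obtain ⟨k, _, _, hp⟩ := h
  exact hp

theorem flatRep_mem (n : Nat) (l : List String) (e : String) (h : e ∈ flatRep n l) : e ∈ l := by
  simp only [flatRep, List.mem_flatten] at h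
  obtain ⟨m, hm, he⟩ := h
  rwa [List.eq_of_mem_replicate hm] at he

theorem flatRep_succ (n : Nat) (l : List String) : flatRep (n + 1) l = flatRep n l ++ l := by
  simp [flatRep, List.replicate_succ']

theorem flatRep_one (l : List String) : flatRep 1 l = l := by
  simp [flatRep]

theorem flatRep_length (n : Nat) (l : List String) : (flatRep n l).length = n * l.length := by
  induction n with
  | zero => simp [flatRep]
  | succ m ih => simp only [flatRep, List.replicate_succ, List.flatten_cons, List.length_append] at *; rw [ih]; ring

-- dict-shape lemmas: the accumulator is always a literal item list A0 ++ (d, v) :: B0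
theorem find_shape (A0 B0 : List (String × List String)) (d : String) (v : List String)
    (hA : ∀ p ∈ A0, p.1 ≠ d) :
    (PySem.Dict.mk (A0 ++ (d, v) :: B0)).getD d [] = v := by
  induction A0 with
  | nil => simp [PySem.Dict.getD, PySem.Dict.get?]
  | cons p rest ih =>
    have hp : (p.1 == d) = false := by
      simpa using hA p (List.mem_cons_self ..)
    simp only [List.cons_append] at *
    simp only [PySem.Dict.getD, PySem.Dict.get?, List.find?, hp] at *
    exact ih (fun q hq => hA q (List.mem_cons_of_mem _ hq))

theorem contains_shape (A0 B0 : List (String × List String)) (d : String) (v : List String) :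
    (PySem.Dict.mk (A0 ++ (d, v) :: B0)).contains d = true := by
  simp [PySem.Dict.contains]

theorem map_noop (l : List (String × List String)) (d : String) (h : ∀ p ∈ l, p.1 ≠ d)
    (v : List String) :
    (l.map (fun p => if (p.1 == d) = true then (d, v) else p)) = l := by
  conv_rhs => rw [← List.map_id l]
  apply List.map_congr_left
  intro p hp
  simp [h p hp]

theorem modify_shape (A0 B0 : List (String × List String)) (d : String) (v : List String)
    (hA : ∀ p ∈ A0, p.1 ≠ d) (hB : ∀ p ∈ B0, p.1 ≠ d) (f : List String → List String) :
    (PySem.Dict.mk (A0 ++ (d, v) :: B0)).modify d [] f = PySem.Dict.mk (A0 ++ (d, f v) :: B0) := by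
  rw [PySem.Dict.modify, find_shape A0 B0 d v hA, PySem.Dict.insert,
    if_pos (contains_shape A0 B0 d v)]
  simp only [List.map_append, List.map_cons, BEq.rfl,
    map_noop A0 d hA (f v), map_noop B0 d hB (f v)]
  simp

theorem plusLoop_shape (rules : PySem.Dict String (List String))
    (A0 B0 : List (String × List String)) (d : String) (v : List String)
    (hA : ∀ p ∈ A0, p.1 ≠ d) (hB : ∀ p ∈ B0, p.1 ≠ d) (k : String) :
    aPlusLoop rules d (PySem.Dict.mk (A0 ++ (d, v) :: B0)) k
      = PySem.Dict.mk (A0 ++ (d, v ++ plusOf rules k) :: B0) := by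
  unfold aPlusLoop plusOf
  generalize rules.getD k [] = vs
  induction vs generalizing v with
  | nil => simp
  | cons e es ih =>
    simp only [List.foldl_cons, List.filter_cons]
    by_cases hp : PySem.Str.pyGet? e 0 = some '+'
    · rw [if_pos hp, modify_shape A0 B0 d v hA hB, ih (v ++ [e])]
      have hpe : plusPred e = true := (plus_char e).mp hp
      simp [hpe, List.append_assoc]
    · have hpe : plusPred e = false := by
        rw [← Bool.not_eq_true]; intro hq; exact hp ((plus_char e).mpr hq)
      rw [if_neg hp, ih v]
      simp [hpe]

theorem minusLoop_shape (rules : PySem.Dict String (List String))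
    (A0 B0 : List (String × List String)) (d : String) (v : List String)
    (hA : ∀ p ∈ A0, p.1 ≠ d) (hv : ∀ e ∈ v, plusPred e = true) (k : String) :
    aMinusLoop rules d (PySem.Dict.mk (A0 ++ (d, v) :: B0)) k
      = PySem.Dict.mk (A0 ++ (d, v) :: B0) := by
  unfold aMinusLoop
  generalize rules.getD k [] = vs
  induction vs with
  | nil => simp
  | cons e es ih =>
    simp only [List.foldl_cons]
    rw [if_neg, ih]
    rintro ⟨h1, h2⟩
    rw [find_shape A0 B0 d v hA] at h2
    rw [(plus_char e).mpr (hv e h2)] at h1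
    exact absurd (Option.some.inj h1) (by decide)

theorem branch_shape (rules : PySem.Dict String (List String))
    (A0 B0 : List (String × List String)) (d : String) (v : List String)
    (hA : ∀ p ∈ A0, p.1 ≠ d) (hB : ∀ p ∈ B0, p.1 ≠ d) (hv : ∀ e ∈ v, plusPred e = true) (k : String) :
    aBranch rules d (PySem.Dict.mk (A0 ++ (d, v) :: B0)) k
      = PySem.Dict.mk (A0 ++ (d, v ++ (if k < d then plusOf rules k else [])) :: B0) := by
  unfold aBranch
  rcases lt_trichotomy k d with h | h | h
  · rw [if_pos h, plusLoop_shape rules A0 B0 d v hA hB k, if_pos h]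
  · subst h
    rw [if_neg (lt_irrefl _), if_neg (lt_irrefl _), if_neg (lt_irrefl _)]
    simp
  · rw [if_neg (asymm h), if_pos h, minusLoop_shape rules A0 B0 d v hA hv k, if_neg (asymm h)]
    simp

theorem innerFold_shape (rules : PySem.Dict String (List String))
    (A0 B0 : List (String × List String)) (d : String)
    (hA : ∀ p ∈ A0, p.1 ≠ d) (hB : ∀ p ∈ B0, p.1 ≠ d) :
    ∀ (ks : List String) (v : List String), (∀ e ∈ v, plusPred e = true) →
    ks.foldl (aInner rules d) (PySem.Dict.mk (A0 ++ (d, v) :: B0))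
      = PySem.Dict.mk (A0 ++ (d, v ++ pFor rules ks d) :: B0) := by
  intro ks
  induction ks with
  | nil =>
    intro v hv
    simp [pFor]
  | cons k ks ih =>
    intro v hv
    simp only [List.foldl_cons]
    have hc := contains_shape A0 B0 d v
    rw [aInner, if_neg (by simp [hc]), branch_shape rules A0 B0 d v hA hB hv k]
    have hv' : ∀ e ∈ v ++ (if k < d then plusOf rules k else []), plusPred e = true := by
      intro e he
      rcases List.mem_append.mp he with h | h
      · exact hv e h
      · by_cases hk : k < d
        · rw [if_pos hk] at h
          simp only [plusOf, List.mem_filter] at h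
          exact h.2
        · rw [if_neg hk] at h; cases h
    rw [ih _ hv']
    by_cases hk : k < d
    · rw [if_pos hk]
      simp only [pFor]
      rw [List.filter_cons_of_pos (p := fun x => decide (x < d)) (l := ks) (decide_eq_true hk),
        List.flatMap_cons, List.append_assoc]
    · rw [if_neg hk]
      simp only [pFor]
      rw [List.filter_cons_of_neg (p := fun x => decide (x < d)) (l := ks)
        (fun h => hk (of_decide_eq_true h)), List.append_nil]

theorem innerFold_new (rules : PySem.Dict String (List String))
    (items0 : List (String × List String)) (d : String)
    (hd : ∀ p ∈ items0, p.1 ≠ d) (ks : List String) (hks : ks ≠ []) :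
    ks.foldl (aInner rules d) (PySem.Dict.mk items0)
      = PySem.Dict.mk (items0 ++ [(d, pFor rules ks d)]) := by
  cases ks with
  | nil => exact absurd rfl hks
  | cons k0 ks =>
    simp only [List.foldl_cons]
    have hc : (PySem.Dict.mk items0).contains d = false := by
      simp only [PySem.Dict.contains, List.any_eq_false]
      intro p hp
      simp [hd p hp]
    have hins : (PySem.Dict.mk items0).insert d [] = PySem.Dict.mk (items0 ++ [(d, [])]) := by
      apply PySem.Dict.ext
      simpa using PySem.Dict.items_insert_of_not_contains _ _ hc
    rw [aInner, if_pos hc, hins]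
    have hshape : items0 ++ [(d, ([] : List String))] = items0 ++ (d, []) :: [] := rfl
    rw [hshape, branch_shape rules items0 [] d [] hd (by simp) (by simp) k0]
    have hv' : ∀ e ∈ ([] : List String) ++ (if k0 < d then plusOf rules k0 else []),
        plusPred e = true := by
      intro e he
      rcases List.mem_append.mp he with h | h
      · cases h
      · by_cases hk : k0 < d
        · rw [if_pos hk] at h
          simp only [plusOf, List.mem_filter] at h
          exact h.2
        · rw [if_neg hk] at h; cases h
    rw [innerFold_shape rules items0 [] d hd (by simp) ks _ hv']
    by_cases hk : k0 < d
    · rw [if_pos hk]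
      simp only [pFor]
      rw [List.filter_cons_of_pos (p := fun x => decide (x < d)) (l := ks) (decide_eq_true hk),
        List.flatMap_cons]
      simp
    · rw [if_neg hk]
      simp only [pFor]
      rw [List.filter_cons_of_neg (p := fun x => decide (x < d)) (l := ks)
        (fun h => hk (of_decide_eq_true h))]
      simp

theorem outer_fold (rules : PySem.Dict String (List String)) (rk : List String) (hrk : rk ≠ []) :
    ∀ (rest processed : List String),
    rest.foldl (fun upd d => rk.foldl (aInner rules d) upd)
      (PySem.Dict.mk ((PySem.Set.ofList processed).map
        (fun d => (d, flatRep (processed.count d) (pFor rules rk d)))))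
    = PySem.Dict.mk ((PySem.Set.ofList (processed ++ rest)).map
        (fun d => (d, flatRep ((processed ++ rest).count d) (pFor rules rk d)))) := by
  intro rest
  induction rest with
  | nil => intro processed; simp
  | cons d rest ih =>
    intro processed
    simp only [List.foldl_cons]
    have hofl : PySem.Set.ofList (processed ++ [d])
        = PySem.Set.add (PySem.Set.ofList processed) d := by
      unfold PySem.Set.ofList
      rw [List.foldl_append]
      rfl
    have happ : processed ++ d :: rest = (processed ++ [d]) ++ rest := by simp
    by_cases hd : d ∈ PySem.Set.ofList processed
    · -- d already seen: its entry gains one more copy of pFor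
      obtain ⟨P1, P2, hsplit⟩ := List.append_of_mem hd
      have hnd := PySem.Set.nodup_ofList processed
      rw [hsplit] at hnd
      have hmid := List.nodup_middle.mp hnd
      have hdP : d ∉ P1 ++ P2 := (List.nodup_cons.mp hmid).1
      have hdP1 : d ∉ P1 := fun h => hdP (List.mem_append.mpr (Or.inl h))
      have hdP2 : d ∉ P2 := fun h => hdP (List.mem_append.mpr (Or.inr h))
      have hadd : PySem.Set.add (PySem.Set.ofList processed) d = PySem.Set.ofList processed := by
        unfold PySem.Set.add
        rw [if_pos]
        simpa using hd
      have hcnt : (processed ++ [d]).count d = processed.count d + 1 := by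
        simp [List.count_append]
      have hcnt' : ∀ x, x ≠ d → (processed ++ [d]).count x = processed.count x := by
        intro x hx
        have h0 : List.count x [d] = 0 := List.count_eq_zero.mpr (by simp [hx])
        rw [List.count_append, h0, Nat.add_zero]
      have hstart : (PySem.Set.ofList processed).map
            (fun x => (x, flatRep (processed.count x) (pFor rules rk x)))
          = P1.map (fun x => (x, flatRep (processed.count x) (pFor rules rk x)))
            ++ (d, flatRep (processed.count d) (pFor rules rk d))
            :: P2.map (fun x => (x, flatRep (processed.count x) (pFor rules rk x))) := by
        rw [hsplit]; simp
      have hrw : (PySem.Set.ofList (processed ++ [d])).map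
            (fun x => (x, flatRep ((processed ++ [d]).count x) (pFor rules rk x)))
          = P1.map (fun x => (x, flatRep (processed.count x) (pFor rules rk x)))
            ++ (d, flatRep (processed.count d + 1) (pFor rules rk d))
            :: P2.map (fun x => (x, flatRep (processed.count x) (pFor rules rk x))) := by
        rw [hofl, hadd, hsplit, List.map_append, List.map_cons]
        congr 1
        · exact List.map_congr_left (fun x hx => by rw [hcnt' x (fun h => hdP1 (h ▸ hx))])
        · congr 1
          · rw [hcnt]
          · exact List.map_congr_left (fun x hx => by rw [hcnt' x (fun h => hdP2 (h ▸ hx))])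
      rw [hstart, innerFold_shape rules _ _ d
        (by
          intro p hp
          obtain ⟨x, hx, rfl⟩ := List.mem_map.mp hp
          exact fun h => hdP1 (h ▸ hx))
        (by
          intro p hp
          obtain ⟨x, hx, rfl⟩ := List.mem_map.mp hp
          exact fun h => hdP2 (h ▸ hx))
        rk _ (fun e he => pFor_plus rules rk d e (flatRep_mem _ _ e he))]
      rw [← flatRep_succ, ← hrw, happ, ih (processed ++ [d])]
    · -- d is new: its entry is appended at the end
      have hdp : d ∉ processed := fun h => hd ((PySem.Set.mem_ofList processed d).mpr h)
      have hadd : PySem.Set.add (PySem.Set.ofList processed) d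
          = PySem.Set.ofList processed ++ [d] := by
        unfold PySem.Set.add
        rw [if_neg]
        simpa using hd
      have hcnt : (processed ++ [d]).count d = 1 := by
        simp [List.count_append, List.count_eq_zero.mpr hdp]
      have hcnt' : ∀ x, x ≠ d → (processed ++ [d]).count x = processed.count x := by
        intro x hx
        have h0 : List.count x [d] = 0 := List.count_eq_zero.mpr (by simp [hx])
        rw [List.count_append, h0, Nat.add_zero]
      have hrw : (PySem.Set.ofList (processed ++ [d])).map
            (fun x => (x, flatRep ((processed ++ [d]).count x) (pFor rules rk x)))
          = (PySem.Set.ofList processed).map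
              (fun x => (x, flatRep (processed.count x) (pFor rules rk x)))
            ++ [(d, pFor rules rk d)] := by
        rw [hofl, hadd, List.map_append, List.map_cons, List.map_nil]
        congr 1
        · exact List.map_congr_left (fun x hx => by rw [hcnt' x (fun h => hd (h ▸ hx))])
        · rw [hcnt, flatRep_one]
      rw [innerFold_new rules _ d
        (by
          intro p hp
          obtain ⟨x, hx, rfl⟩ := List.mem_map.mp hp
          exact fun h => hd (h ▸ hx))
        rk hrk]
      rw [← hrw, happ, ih (processed ++ [d])]

theorem A_empty (datesList : List String) : createUpdatedRulesDict datesList [] = [] := by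
  unfold createUpdatedRulesDict
  simp only [List.map_nil]
  have hs : PySem.List.sorted ([] : List String) (fun x => x) false = [] := rfl
  rw [hs]
  simp only [List.foldl_nil]
  generalize PySem.List.sorted datesList (fun x => x) false = l
  induction l with
  | nil => rfl
  | cons x xs ih => rw [List.foldl_cons]; exact ih

theorem A_char (datesList : List String) (rulesDict : List (String × List String))
    (hne : rulesDict ≠ []) :
    createUpdatedRulesDict datesList rulesDict
      = (PySem.Set.ofList (PySem.List.sorted datesList (fun x => x) false)).map
          (fun d => (d, flatRep ((PySem.List.sorted datesList (fun x => x) false).count d)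
            (pFor (PySem.Dict.mk rulesDict)
              (PySem.List.sorted (rulesDict.map (fun kv => kv.1)) (fun x => x) false) d))) := by
  have hrk : PySem.List.sorted (rulesDict.map (fun kv => kv.1)) (fun x => x) false ≠ [] := by
    rw [Ne, PySem.List.sorted_eq_nil_iff, List.map_eq_nil_iff]
    exact hne
  have h0 := outer_fold (PySem.Dict.mk rulesDict) _ hrk
    (PySem.List.sorted datesList (fun x => x) false) []
  have hofl0 : PySem.Set.ofList ([] : List String) = [] := rfl
  rw [hofl0, List.map_nil, List.nil_append] at h0
  unfold createUpdatedRulesDict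
  have hemp : (PySem.Dict.empty : PySem.Dict String (List String))
      = PySem.Dict.mk [] := rfl
  rw [hemp, h0]

theorem altPlus_eq (rules : PySem.Dict String (List String)) (k : String) (acc : List String) :
    altPlus rules k acc = acc ++ plusOf rules k := by
  unfold altPlus plusOf
  have h := PySem.List.foldl_append_if (fun e => PySem.Str.startswith e "+") id (rules.getD k []) acc
  simpa [plusPred] using h

theorem altWhile_eq (rules : PySem.Dict String (List String)) (d : String) :
    ∀ (rd acc : List String), rd.Pairwise (· ≤ ·) →
    altWhile rules d rd acc
      = (rd.filter (fun k => !decide (k < d)),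
         acc ++ (rd.filter (fun k => decide (k < d))).flatMap (fun k => plusOf rules k)) := by
  intro rd
  induction rd with
  | nil => intro acc _; simp [altWhile]
  | cons k rest ih =>
    intro acc hp
    have hrest := (List.pairwise_cons.mp hp).2
    simp only [altWhile]
    by_cases hk : k < d
    · rw [if_pos hk, ih _ hrest, altPlus_eq,
        List.filter_cons_of_pos (p := fun x => decide (x < d)) (l := rest) (decide_eq_true hk),
        List.filter_cons_of_neg (p := fun x => !decide (x < d)) (l := rest) (by simp [hk]),
        List.flatMap_cons, List.append_assoc]
    · have hge : ∀ a ∈ rest, ¬ a < d := by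
        intro a ha
        exact not_lt.mpr (le_trans (not_lt.mp hk) ((List.pairwise_cons.mp hp).1 a ha))
      have h1 : List.filter (fun x => !decide (x < d)) (k :: rest) = k :: rest := by
        rw [List.filter_eq_self]
        intro a ha
        rcases List.mem_cons.mp ha with h | h
        · subst h; simp [hk]
        · simp [hge a h]
      have h2 : List.filter (fun x => decide (x < d)) (k :: rest) = [] := by
        rw [List.filter_eq_nil_iff]
        intro a ha
        rcases List.mem_cons.mp ha with h | h
        · subst h; simp [hk]
        · simp [hge a h]
      rw [if_neg hk, h1, h2]
      simp

theorem filter_split (d d' : String) (hdd : d ≤ d') :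
    ∀ (rd : List String), rd.Pairwise (· ≤ ·) →
    rd.filter (fun k => decide (k < d'))
      = rd.filter (fun k => decide (k < d))
        ++ (rd.filter (fun k => !decide (k < d))).filter (fun k => decide (k < d')) := by
  intro rd
  induction rd with
  | nil => simp
  | cons k rest ih =>
    intro hp
    have hrest := (List.pairwise_cons.mp hp).2
    by_cases hk : k < d
    · have hk' : k < d' := lt_of_lt_of_le hk hdd
      rw [List.filter_cons_of_pos (p := fun x => decide (x < d')) (l := rest) (decide_eq_true hk'),
        List.filter_cons_of_pos (p := fun x => decide (x < d)) (l := rest) (decide_eq_true hk),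
        List.filter_cons_of_neg (p := fun x => !decide (x < d)) (l := rest) (by simp [hk]),
        ih hrest, List.cons_append]
    · have hge : ∀ a ∈ rest, ¬ a < d := by
        intro a ha
        exact not_lt.mpr (le_trans (not_lt.mp hk) ((List.pairwise_cons.mp hp).1 a ha))
      have h0 : List.filter (fun x => decide (x < d)) rest = [] := by
        rw [List.filter_eq_nil_iff]
        intro a ha
        simp [hge a ha]
      have h1 : List.filter (fun x => !decide (x < d)) rest = rest := by
        rw [List.filter_eq_self]
        intro a ha
        simp [hge a ha]
      rw [List.filter_cons_of_neg (p := fun x => decide (x < d)) (l := rest) (by simp [hk]),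
        List.filter_cons_of_pos (p := fun x => !decide (x < d)) (l := rest) (by simp [hk]),
        h0, h1, List.nil_append]

theorem altMain_eq (rules : PySem.Dict String (List String)) :
    ∀ (ds rd acc : List String), rd.Pairwise (· ≤ ·) → ds.Pairwise (· ≤ ·) →
    altMain rules ds rd acc = ds.map (fun d => (d, acc ++ pFor rules rd d)) := by
  intro ds
  induction ds with
  | nil => intros; rfl
  | cons d ds ih =>
    intro rd acc hrd hds
    simp only [altMain]
    rw [altWhile_eq rules d rd acc hrd]
    simp only [List.map_cons]
    rw [ih (rd.filter (fun k => !decide (k < d))) _ (hrd.filter _) (List.pairwise_cons.mp hds).2]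
    congr 1
    apply List.map_congr_left
    intro d' hd'
    have hdd' : d ≤ d' := (List.pairwise_cons.mp hds).1 d' hd'
    have hsp := filter_split d d' hdd' rd hrd
    simp only [pFor]
    rw [hsp, List.flatMap_append, List.append_assoc]

theorem B_char (datesList : List String) (rulesDict : List (String × List String)) :
    createUpdatedRulesDict_alt datesList rulesDict
      = (PySem.List.sorted (PySem.Set.ofList datesList) (fun x => x) false).map
          (fun d => (d, pFor (PySem.Dict.mk rulesDict)
            (PySem.List.sorted (rulesDict.map (fun kv => kv.1)) (fun x => x) false) d)) := by
  unfold createUpdatedRulesDict_alt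
  rw [altMain_eq (PySem.Dict.mk rulesDict) _ _ []
    (by simpa using PySem.List.sorted_pairwise (rulesDict.map (fun kv => kv.1)) (fun x => x))
    (by simpa using PySem.List.sorted_pairwise (PySem.Set.ofList datesList) (fun x => x))]
  simp

theorem ofList_pairwise_lt (xs : List String) (h : xs.Pairwise (· ≤ ·)) :
    (PySem.Set.ofList xs).Pairwise (· < ·) := by
  suffices hgen : ∀ (ys s : List String), s.Pairwise (· < ·) →
      (∀ a ∈ s, ∀ b ∈ ys, a ≤ b) → ys.Pairwise (· ≤ ·) →
      (List.foldl PySem.Set.add s ys).Pairwise (· < ·) by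
    exact hgen xs [] (by simp) (by simp) h
  intro ys
  induction ys with
  | nil => intro s hs _ _; simpa using hs
  | cons b bs ih =>
    intro s hs hsx hx
    rw [List.foldl_cons]
    apply ih
    · unfold PySem.Set.add
      by_cases hc : PySem.Set.contains s b = true
      · rw [if_pos hc]; exact hs
      · rw [if_neg hc]
        apply List.pairwise_append.mpr
        refine ⟨hs, by simp, ?_⟩
        intro a ha b' hb'
        have hb'' : b' = b := by simpa using hb'
        subst hb''
        have hab : a ≤ b' := hsx a ha b' (List.mem_cons_self ..)
        have hneq : a ≠ b' := by
          intro hh; subst hh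
          exact hc (by simpa [PySem.Set.contains] using ha)
        exact lt_of_le_of_ne hab hneq
    · intro a ha c hc
      rcases (PySem.Set.mem_add s b a).mp ha with h1 | h1
      · exact hsx a h1 c (List.mem_cons_of_mem _ hc)
      · subst h1; exact (List.pairwise_cons.mp hx).1 c hc
    · exact (List.pairwise_cons.mp hx).2

theorem sortedset_eq (xs : List String) :
    PySem.Set.ofList (PySem.List.sorted xs (fun x => x) false)
      = PySem.List.sorted (PySem.Set.ofList xs) (fun x => x) false := by
  refine (PySem.List.sorted_eq_of_perm_of_pairwise_lt _ _ _ ?_ ?_).symm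
  · rw [List.perm_ext_iff_of_nodup (PySem.Set.nodup_ofList _) (PySem.Set.nodup_ofList _)]
    intro a
    rw [PySem.Set.mem_ofList, PySem.Set.mem_ofList, PySem.List.mem_sorted]
  · have h := ofList_pairwise_lt (PySem.List.sorted xs (fun x => x) false)
      (by simpa using PySem.List.sorted_pairwise xs (fun x => x))
    simpa using h

theorem getD_key_mem (rulesDict : List (String × List String)) (k : String)
    (h : k ∈ rulesDict.map (fun kv => kv.1)) :
    ∃ kv ∈ rulesDict, kv.1 = k ∧ (PySem.Dict.mk rulesDict).getD k [] = kv.2 := by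
  induction rulesDict with
  | nil => simp at h
  | cons p rest ih =>
    by_cases hpk : p.1 = k
    · exact ⟨p, List.mem_cons_self .., hpk, by
        simp [PySem.Dict.getD, PySem.Dict.get?, List.find?, hpk]⟩
    · have h' : k ∈ rest.map (fun kv => kv.1) := by
        rcases List.mem_map.mp h with ⟨q, hq, hqk⟩
        rcases List.mem_cons.mp hq with h1 | h1
        · exact absurd (h1 ▸ hqk) hpk
        · exact List.mem_map.mpr ⟨q, h1, hqk⟩
      obtain ⟨kv, hkv, hk1, hg⟩ := ih h'
      refine ⟨kv, List.mem_cons_of_mem _ hkv, hk1, ?_⟩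
      rw [← hg]
      have hbeq : (p.1 == k) = false := by simp [hpk]
      simp [PySem.Dict.getD, PySem.Dict.get?, List.find?, hbeq]

theorem pFor_nil (rulesDict : List (String × List String)) (d : String)
    (h : ∀ kv ∈ rulesDict, ¬(kv.1 < d ∧ ∃ e ∈ kv.2, plusPred e = true)) :
    pFor (PySem.Dict.mk rulesDict)
      (PySem.List.sorted (rulesDict.map (fun kv => kv.1)) (fun x => x) false) d = [] := by
  unfold pFor
  apply List.flatMap_eq_nil_iff.mpr
  intro k hk
  rcases List.mem_filter.mp hk with ⟨hk1, hk2⟩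
  have hk1' : k ∈ rulesDict.map (fun kv => kv.1) := (PySem.List.mem_sorted _ _ _ _).mp hk1
  obtain ⟨kv, hkv, hkeq, hg⟩ := getD_key_mem rulesDict k hk1'
  unfold plusOf
  rw [hg, List.filter_eq_nil_iff]
  intro e he hpe
  exact h kv hkv ⟨hkeq ▸ of_decide_eq_true hk2, e, he, hpe⟩

theorem pFor_mem (rulesDict : List (String × List String)) (d e : String)
    (hnd : (rulesDict.map (fun kv => kv.1)).Nodup)
    (kv : String × List String) (hkv : kv ∈ rulesDict) (hlt : kv.1 < d)
    (he : e ∈ kv.2) (hp : plusPred e = true) :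
    e ∈ pFor (PySem.Dict.mk rulesDict)
      (PySem.List.sorted (rulesDict.map (fun kv => kv.1)) (fun x => x) false) d := by
  unfold pFor
  apply List.mem_flatMap.mpr
  refine ⟨kv.1, ?_, ?_⟩
  · apply List.mem_filter.mpr
    refine ⟨?_, decide_eq_true hlt⟩
    rw [PySem.List.mem_sorted]
    exact List.mem_map.mpr ⟨kv, hkv, rfl⟩
  · unfold plusOf
    have hkv' : (kv.1, kv.2) ∈ (PySem.Dict.mk rulesDict).items := by
      simpa using hkv
    have hg : (PySem.Dict.mk rulesDict).getD kv.1 [] = kv.2 :=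
      PySem.Dict.getD_of_mem_items _ hkv' (by simpa using hnd) []
    rw [hg]
    exact List.mem_filter.mpr ⟨he, hp⟩

-- ===== VERDICT (by name: the statement is the Claim_ definition above) =====
theorem createUpdatedRulesDict_spec : Claim_unchanged_createUpdatedRulesDict := by
  unfold Claim_unchanged_createUpdatedRulesDict
  intro dl rd _ hPre
  unfold Spec_createUpdatedRulesDict
  intro hD
  unfold D_createUpdatedRulesDict at hD
  push_neg at hD
  obtain ⟨hD1, hD2⟩ := hD
  by_cases h0 : rd = []
  · subst h0
    have hdl : dl = [] := hD1 rfl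
    subst hdl
    rw [A_empty]
    rfl
  · rw [A_char dl rd h0, B_char, ← sortedset_eq]
    apply List.map_congr_left
    intro d hdmem
    have hdml : d ∈ dl := by
      rw [PySem.Set.mem_ofList, PySem.List.mem_sorted] at hdmem
      exact hdmem
    have hcnteq : (PySem.List.sorted dl (fun x => x) false).count d = dl.count d :=
      (PySem.List.sorted_perm dl (fun x => x) false).count_eq d
    rcases Nat.lt_or_ge (dl.count d) 2 with hc | hc
    · have hpos : 0 < dl.count d := List.count_pos_iff.mpr hdml
      have hc1 : dl.count d = 1 := by omega
      rw [hcnteq, hc1, flatRep_one]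
    · have hnil : pFor (PySem.Dict.mk rd)
          (PySem.List.sorted (rd.map (fun kv => kv.1)) (fun x => x) false) d = [] := by
        apply pFor_nil
        intro kv hkv hbad
        obtain ⟨hlt, e, he, hpe⟩ := hbad
        exact hD2 d hdml hc kv hkv hlt e he (by simpa [plusPred] using hpe)
      rw [hcnteq, hnil]
      have hfr : flatRep (dl.count d) [] = [] := by simp [flatRep]
      rw [hfr]
theorem createUpdatedRulesDict_changed : Claim_changed_createUpdatedRulesDict := by
  have hab : ("a" : String) < "b" := by simp; decide
  have hrk' : PySem.List.sorted ["a"] (fun x => x) false = ["a"] :=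
    PySem.List.sorted_eq_self_of_pairwise _ _ (by simp)
  have hsd : PySem.List.sorted ["b", "b"] (fun x => x) false = ["b", "b"] :=
    PySem.List.sorted_eq_self_of_pairwise _ _ (by simp)
  have hs1 : PySem.List.sorted ["b"] (fun x => x) false = ["b"] :=
    PySem.List.sorted_eq_self_of_pairwise _ _ (by simp)
  have hp : pFor (PySem.Dict.mk [("a", ["+x"])]) ["a"] "b" = ["+x"] := by
    unfold pFor plusOf
    rw [List.filter_cons_of_pos (p := fun x => decide (x < "b")) (l := ([] : List String))
      (decide_eq_true hab)]
    simp only [List.filter_nil, List.flatMap_cons, List.flatMap_nil, List.append_nil]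
    decide
  have hA : createUpdatedRulesDict ["b", "b"] [("a", ["+x"])] = [("b", ["+x", "+x"])] := by
    rw [A_char _ _ (by simp), hsd,
      show ([("a", ["+x"])] : List (String × List String)).map (fun kv => kv.1) = ["a"] from rfl,
      hrk', show PySem.Set.ofList ["b", "b"] = ["b"] from by decide]
    simp only [List.map_cons, List.map_nil]
    rw [hp, show (["b", "b"] : List String).count "b" = 2 from by decide]
    rfl
  have hB : createUpdatedRulesDict_alt ["b", "b"] [("a", ["+x"])] = [("b", ["+x"])] := by
    rw [B_char, show PySem.Set.ofList ["b", "b"] = ["b"] from by decide, hs1,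
      show ([("a", ["+x"])] : List (String × List String)).map (fun kv => kv.1) = ["a"] from rfl,
      hrk']
    simp only [List.map_cons, List.map_nil]
    rw [hp]
  unfold Claim_changed_createUpdatedRulesDict
  simp only [pvDiffWitness_createUpdatedRulesDict, pvDiffWitnessOut_createUpdatedRulesDict]
  refine ⟨by decide, by decide, ?_, hA, hB, by decide⟩
  unfold D_createUpdatedRulesDict
  right
  exact ⟨"b", by simp, by decide, ("a", ["+x"]), by simp, hab, "+x", by simp, by decide⟩
theorem createUpdatedRulesDict_tight : Claim_exact_createUpdatedRulesDict := by
  unfold Claim_exact_createUpdatedRulesDict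
  intro dl rd _ hPre hD
  rcases hD with ⟨h0, hdl⟩ | ⟨d, hdml, hc, kv, hkv, hlt, e, he, hsw⟩
  · subst h0
    rw [A_empty, B_char]
    intro heq
    obtain ⟨x, hx⟩ := List.exists_mem_of_ne_nil dl hdl
    have hxs : x ∈ PySem.List.sorted (PySem.Set.ofList dl) (fun x => x) false := by
      rw [PySem.List.mem_sorted, PySem.Set.mem_ofList]
      exact hx
    have hne := List.ne_nil_of_mem hxs
    exact hne (List.map_eq_nil_iff.mp heq.symm)
  · have h0 : rd ≠ [] := by rintro rfl; cases hkv
    rw [A_char dl rd h0, B_char, ← sortedset_eq]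
    intro heq
    have hdS : d ∈ PySem.Set.ofList (PySem.List.sorted dl (fun x => x) false) := by
      rw [PySem.Set.mem_ofList, PySem.List.mem_sorted]
      exact hdml
    have hfe := List.map_inj_left.mp heq d hdS
    have hsnd := congrArg Prod.snd hfe
    simp only [] at hsnd
    have hcnteq : (PySem.List.sorted dl (fun x => x) false).count d = dl.count d :=
      (PySem.List.sorted_perm dl (fun x => x) false).count_eq d
    have hep : e ∈ pFor (PySem.Dict.mk rd)
        (PySem.List.sorted (rd.map (fun kv => kv.1)) (fun x => x) false) d :=
      pFor_mem rd d e hPre.1 kv hkv hlt he (by simpa [plusPred] using hsw)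
    have hlp : 1 ≤ (pFor (PySem.Dict.mk rd)
        (PySem.List.sorted (rd.map (fun kv => kv.1)) (fun x => x) false) d).length :=
      List.length_pos_of_mem hep
    have hlen := congrArg List.length hsnd
    rw [flatRep_length, hcnteq] at hlen
    have h2 := Nat.mul_le_mul_right (pFor (PySem.Dict.mk rd)
        (PySem.List.sorted (rd.map (fun kv => kv.1)) (fun x => x) false) d).length hc
    omega
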